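-- pv_equiv track=rewrite | github.com/kwj/project-euler | python/euler/bin/p0068.py | find_rings
-- ===== SOURCE A (Python) =====
-- from collections.abc import Sequence
--
-- def find_rings(n_gon: int, total: int) -> list[str]:
--     numbers = list(range(1, n_gon * 2 + 1))
--     rings: list[str] = []
--
--     def make_str(ring: Sequence[int]) -> str:
--         result = ''
--         for i in range(0, n_gon * 2, 2):
--             result = f'{result}{ring[i + 1]}{ring[i]}{ring[i + 2]}'
--
--         return result
--
--     # ring :: list[int]
--     #   +-+-+--     ---+-+-+   X: first selected inner node -- ring[0]
--     #   |X|Y|   ...    | |Z|   Y: first selected outer node -- ring[1]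
--     #   +-+-+--     ---+-+-+   Z: last selected inner node -- ring[-1]
--     #    0
--     #
--     #     [Y]
--     #       \
--     #        [X]   *
--     #       /   \ /
--     #     ??     *
--     #    / \    /
--     #  ??  [Z]-*-- *
--     #        \
--     #         ??
--     def next_states(
--         state: tuple[list[int], list[int]],
--     ) -> list[tuple[list[int], list[int]]]:
--         ring, rest = state
--         result: list[tuple[list[int], list[int]]] = []
--
--         if len(rest) == 1:
--             outer = rest[0]
--             if outer > ring[1] and outer + ring[0] + ring[-1] == total:
--                 # a magic `n-gon` ring found
--                 rings.append(make_str(ring + [outer, ring[0]]))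
--         else:
--             for outer in rest:
--                 if (len(ring) == 1 and outer > n_gon + 1) or (len(ring) > 1 and outer < ring[1]):
--                     continue
--                 inner = total - outer - ring[-1]
--                 if outer == inner:
--                     continue
--                 if inner not in rest:
--                     continue
--                 tmp = rest[:]
--                 tmp.remove(outer)
--                 tmp.remove(inner)
--                 result.append((ring + [outer, inner], tmp))
--
--         return result
--
--     stack: list[tuple[list[int], list[int]]] = []
--     for x in numbers:
--         tmp = numbers[:]
--         tmp.remove(x)
--         stack.append(([x], tmp))
--
--     while len(stack) > 0:
--         state = stack.pop()
--         stack += next_states(state)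
--
--     return rings
-- ===== SOURCE B (Python) =====
-- def find_rings(n_gon: int, total: int) -> list[str]:
--     numbers = list(range(1, n_gon * 2 + 1))
--     rings: list[str] = []
--
--     def make_str(ring):
--         result = ''
--         for i in range(0, n_gon * 2, 2):
--             result = f'{result}{ring[i + 1]}{ring[i]}{ring[i + 2]}'
--         return result
--
--     # Recursive backtracking: ring is the partial ring, rest the unused numbers.
--     # Candidates are tried in reversed order so rings comes out in the same
--     # (LIFO) order as the original explicit-stack search.
--     def extend(ring, rest):
--         if len(rest) == 1:
--             outer = rest[0]
--             if outer > ring[1] and outer + ring[0] + ring[-1] == total: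
--                 rings.append(make_str(ring + [outer, ring[0]]))
--             return
--         for outer in reversed(rest):
--             if (len(ring) == 1 and outer > n_gon + 1) or (len(ring) > 1 and outer < ring[1]):
--                 continue
--             inner = total - outer - ring[-1]
--             if outer == inner or inner not in rest:
--                 continue
--             tmp = rest[:]
--             tmp.remove(outer)
--             tmp.remove(inner)
--             extend(ring + [outer, inner], tmp)
--
--     for x in reversed(numbers):
--         tmp = numbers[:]
--         tmp.remove(x)
--         extend([x], tmp)
--     return rings
-- ===== Notes on version B (the rewrite author's own statement) =====
-- stated objective: simpler
-- what changed: Replaced the explicit stack/while-loop worklist with a recursive backtracking helper extend(ring, rest) that iterates seeds and candidates in reversed order, reproducing the original LIFO visitation order exactly.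
import Mathlib
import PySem

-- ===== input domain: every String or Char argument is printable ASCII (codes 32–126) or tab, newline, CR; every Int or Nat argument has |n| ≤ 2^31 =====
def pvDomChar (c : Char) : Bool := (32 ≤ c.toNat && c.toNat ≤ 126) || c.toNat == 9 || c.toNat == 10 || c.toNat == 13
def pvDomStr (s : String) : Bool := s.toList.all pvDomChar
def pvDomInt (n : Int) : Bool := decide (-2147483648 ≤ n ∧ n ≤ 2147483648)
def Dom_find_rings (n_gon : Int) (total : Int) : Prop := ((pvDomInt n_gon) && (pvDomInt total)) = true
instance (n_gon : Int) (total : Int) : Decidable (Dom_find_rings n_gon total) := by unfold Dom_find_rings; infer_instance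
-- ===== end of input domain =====

-- B replaces A's explicit stack/while-loop backtracking with a recursive helper that visits
-- candidates in reversed order (same pruning, same output order); objective: simpler.


-- ===== PORT A =====
-- make_str: shared verbatim by A and B (B keeps make_str unchanged).  ring[i] is ported as
-- pyGetD … 0: exact here because make_str is only called with ring of length n_gon*2+1 and
-- indices 0 ≤ i+2 ≤ n_gon*2, where Python does not raise.
def pvMakeStr (n_gon : Int) (ring : List Int) : String :=
  String.ofList ((PySem.List.pyRange 0 (n_gon * 2) 2).foldl
    (fun result i =>
      result ++ PySem.Int.toChars (PySem.List.pyGetD ring (i + 1) 0)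
             ++ PySem.Int.toChars (PySem.List.pyGetD ring i 0)
             ++ PySem.Int.toChars (PySem.List.pyGetD ring (i + 2) 0)) [])

-- tmp = rest[:]; tmp.remove(outer); tmp.remove(inner) — exact where reached: the guards
-- guarantee outer ∈ rest and inner ∈ rest, so remove? is always `some` (no ValueError).
def pvRemove2 (rest : List Int) (outer inner : Int) : List Int :=
  let t := (PySem.List.remove? rest outer).getD rest
  (PySem.List.remove? t inner).getD t

-- next_states, purified: returns (rings appended by this call, child states pushed).
-- ring[1]/ring[0]/ring[-1] are ported as pyGetD … 0: under Pre_ (n_gon ≠ 1) every state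
-- reaching the len(rest)==1 branch has len(ring) ≥ 3, so Python does not raise there.
def pvStep (n_gon total : Int) (ring rest : List Int) :
    List String × List (List Int × List Int) :=
  if rest.length = 1 then
    let outer := PySem.List.pyGetD rest 0 0
    if outer > PySem.List.pyGetD ring 1 0 ∧
        outer + PySem.List.pyGetD ring 0 0 + PySem.List.pyGetD ring (-1) 0 = total then
      ([pvMakeStr n_gon (ring ++ [outer, PySem.List.pyGetD ring 0 0])], [])
    else ([], [])
  else
    ([], rest.foldl (fun acc outer =>
      if (ring.length = 1 ∧ outer > n_gon + 1) ∨
          (ring.length > 1 ∧ outer < PySem.List.pyGetD ring 1 0) then acc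
      else
        let inner := total - outer - PySem.List.pyGetD ring (-1) 0
        if outer = inner then acc
        else if inner ∉ rest then acc
        else acc ++ [(ring ++ [outer, inner], pvRemove2 rest outer inner)]) [])

-- ---- facts needed by pvRun's termination (cited in decreasing_by) ----

def pvMeasure (stack : List (List Int × List Int)) : Nat :=
  (stack.map (fun st => (st.2.length + 1).factorial)).sum

-- the candidate-to-child function that A's inner for-loop implements guard-for-guard
def pvChild (n_gon total : Int) (ring rest : List Int) (outer : Int) :
    Option (List Int × List Int) :=
  if (ring.length = 1 ∧ outer > n_gon + 1) ∨
      (ring.length > 1 ∧ outer < PySem.List.pyGetD ring 1 0) then none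
  else if outer = total - outer - PySem.List.pyGetD ring (-1) 0 then none
  else if total - outer - PySem.List.pyGetD ring (-1) 0 ∉ rest then none
  else some (ring ++ [outer, total - outer - PySem.List.pyGetD ring (-1) 0],
    pvRemove2 rest outer (total - outer - PySem.List.pyGetD ring (-1) 0))

lemma pvRemove2_len {rest : List Int} {o i : Int} (ho : o ∈ rest) (hi : i ∈ rest)
    (hne : o ≠ i) : (pvRemove2 rest o i).length + 2 = rest.length := by
  have h1 : PySem.List.remove? rest o = some (rest.erase o) :=
    PySem.List.remove?_eq_some_erase rest o ho
  have hi' : i ∈ rest.erase o := (List.mem_erase_of_ne (Ne.symm hne)).mpr hi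
  have h2 : PySem.List.remove? (rest.erase o) i = some ((rest.erase o).erase i) :=
    PySem.List.remove?_eq_some_erase _ i hi'
  have l1 : (rest.erase o).length = rest.length - 1 := List.length_erase_of_mem ho
  have l2 : ((rest.erase o).erase i).length = (rest.erase o).length - 1 :=
    List.length_erase_of_mem hi'
  have hpos : 0 < rest.length := List.length_pos_of_mem ho
  have hpos2 : 0 < (rest.erase o).length := List.length_pos_of_mem hi'
  simp only [pvRemove2, h1, Option.getD_some, h2]
  omega

lemma pvChild_len {n_gon total : Int} {ring rest : List Int} {outer : Int}
    {c : List Int × List Int} (ho : outer ∈ rest)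
    (hc : pvChild n_gon total ring rest outer = some c) :
    c.2.length + 2 = rest.length := by
  unfold pvChild at hc
  split_ifs at hc with h1 h2 h3 <;>
    first
      | exact Option.noConfusion hc
      | (simp only [Option.some.injEq] at hc
         subst hc
         exact pvRemove2_len ho h3 h2)

lemma pvBody_eq (n_gon total : Int) (ring rest : List Int)
    (acc : List (List Int × List Int)) (x : Int) :
    (if (ring.length = 1 ∧ x > n_gon + 1) ∨
        (ring.length > 1 ∧ x < PySem.List.pyGetD ring 1 0) then acc
     else
       if x = total - x - PySem.List.pyGetD ring (-1) 0 then acc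
       else if total - x - PySem.List.pyGetD ring (-1) 0 ∉ rest then acc
       else acc ++ [(ring ++ [x, total - x - PySem.List.pyGetD ring (-1) 0],
         pvRemove2 rest x (total - x - PySem.List.pyGetD ring (-1) 0))]) =
      acc ++ (pvChild n_gon total ring rest x).toList := by
  unfold pvChild
  split_ifs <;> simp

lemma pvStep_foldl (n_gon total : Int) (ring rest : List Int) :
    ∀ (l : List Int) (acc : List (List Int × List Int)),
    (l.foldl (fun acc outer =>
      if (ring.length = 1 ∧ outer > n_gon + 1) ∨
          (ring.length > 1 ∧ outer < PySem.List.pyGetD ring 1 0) then acc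
      else
        let inner := total - outer - PySem.List.pyGetD ring (-1) 0
        if outer = inner then acc
        else if inner ∉ rest then acc
        else acc ++ [(ring ++ [outer, inner], pvRemove2 rest outer inner)]) acc) =
      acc ++ l.filterMap (pvChild n_gon total ring rest) := by
  intro l
  induction l with
  | nil => intro acc; simp
  | cons x xs ih =>
    intro acc
    simp only [List.foldl_cons]
    rw [pvBody_eq, ih]
    cases hcx : pvChild n_gon total ring rest x <;> simp [List.filterMap_cons, hcx]

lemma pvStep_snd (n_gon total : Int) (ring rest : List Int) (h : ¬ rest.length = 1) :
    (pvStep n_gon total ring rest).2 = rest.filterMap (pvChild n_gon total ring rest) := by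
  unfold pvStep
  rw [if_neg h]
  simpa using pvStep_foldl n_gon total ring rest rest []

lemma pvStep_snd_nil (n_gon total : Int) (ring rest : List Int) (h : rest.length = 1) :
    (pvStep n_gon total ring rest).2 = [] := by
  unfold pvStep
  rw [if_pos h]
  dsimp only
  split <;> rfl

lemma pvMeasure_append (s t : List (List Int × List Int)) :
    pvMeasure (s ++ t) = pvMeasure s + pvMeasure t := by
  simp [pvMeasure]

lemma pvMeasure_step (n_gon total : Int) (ring rest : List Int) :
    pvMeasure (pvStep n_gon total ring rest).2 < (rest.length + 1).factorial := by
  by_cases h1 : rest.length = 1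
  · rw [pvStep_snd_nil n_gon total ring rest h1]
    simp [pvMeasure, Nat.factorial_pos]
  rw [pvStep_snd n_gon total ring rest h1]
  rcases Nat.eq_zero_or_pos rest.length with h0 | hpos
  · have : rest = [] := List.eq_nil_of_length_eq_zero h0
    subst this
    simp [pvMeasure, Nat.factorial_pos]
  · have hbound : ∀ st ∈ (rest.filterMap (pvChild n_gon total ring rest)).map
        (fun st => (st.2.length + 1).factorial), st = (rest.length - 1).factorial := by
      intro v hv
      simp only [List.mem_map, List.mem_filterMap] at hv
      obtain ⟨c, ⟨o, ho, hc⟩, rfl⟩ := hv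
      have := pvChild_len ho hc
      congr 1
      omega
    have hlen : ((rest.filterMap (pvChild n_gon total ring rest)).map
        (fun st => (st.2.length + 1).factorial)).length ≤ rest.length := by
      simpa using List.length_filterMap_le _ _
    calc pvMeasure (rest.filterMap (pvChild n_gon total ring rest))
        ≤ ((rest.filterMap (pvChild n_gon total ring rest)).map
            (fun st => (st.2.length + 1).factorial)).length * (rest.length - 1).factorial :=
          List.sum_le_card_nsmul _ _ (fun x hx => le_of_eq (hbound x hx))
      _ ≤ rest.length * (rest.length - 1).factorial := Nat.mul_le_mul_right _ hlen
      _ = rest.length.factorial := by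
          cases hr : rest.length with
          | zero => omega
          | succ k => simp [Nat.factorial_succ]
      _ < (rest.length + 1).factorial := (Nat.factorial_lt (by omega)).mpr (by omega)

-- the while loop: pop from the end of the stack, push the children
def pvRun (n_gon total : Int) (stack : List (List Int × List Int)) (rings : List String) :
    List String :=
  if hs : stack = [] then rings
  else
    let st := stack.getLast hs
    let r := pvStep n_gon total st.1 st.2
    pvRun n_gon total (stack.dropLast ++ r.2) (rings ++ r.1)
termination_by pvMeasure stack
decreasing_by
  rw [pvMeasure_append]
  conv_rhs => rw [← List.dropLast_concat_getLast hs, pvMeasure_append]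
  have h1 : pvMeasure [stack.getLast hs] = ((stack.getLast hs).2.length + 1).factorial := by
    simp [pvMeasure]
  have h2 := pvMeasure_step n_gon total (stack.getLast hs).1 (stack.getLast hs).2
  omega

def find_rings (n_gon : Int) (total : Int) : List String :=
  let numbers := PySem.List.pyRange 1 (n_gon * 2 + 1) 1
  let stack := numbers.foldl
    (fun acc x => acc ++ [([x], (PySem.List.remove? numbers x).getD numbers)]) []
  pvRun n_gon total stack []

-- ===== PORT B =====
-- recursive backtracking, candidates visited in reversed order (Source B's `extend`);
-- `attach` only carries the membership fact used for termination.
def pvDfs (n_gon total : Int) (ring rest : List Int) : List String :=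
  if rest.length = 1 then
    let outer := PySem.List.pyGetD rest 0 0
    if outer > PySem.List.pyGetD ring 1 0 ∧
        outer + PySem.List.pyGetD ring 0 0 + PySem.List.pyGetD ring (-1) 0 = total then
      [pvMakeStr n_gon (ring ++ [outer, PySem.List.pyGetD ring 0 0])]
    else []
  else
    rest.reverse.attach.foldl (fun acc x =>
      if (ring.length = 1 ∧ x.1 > n_gon + 1) ∨
          (ring.length > 1 ∧ x.1 < PySem.List.pyGetD ring 1 0) then acc
      else
        let inner := total - x.1 - PySem.List.pyGetD ring (-1) 0
        if heq : x.1 = inner then acc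
        else if hmem : inner ∉ rest then acc
        else acc ++ pvDfs n_gon total (ring ++ [x.1, inner]) (pvRemove2 rest x.1 inner)) []
termination_by rest.length
decreasing_by
  have ho : x.1 ∈ rest := List.mem_reverse.mp x.2
  push_neg at hmem
  have hlen : (pvRemove2 rest x.1 (total - x.1 - PySem.List.pyGetD ring (-1) 0)).length + 2 =
      rest.length := pvRemove2_len ho hmem heq
  omega

def find_rings_alt (n_gon : Int) (total : Int) : List String :=
  let numbers := PySem.List.pyRange 1 (n_gon * 2 + 1) 1
  numbers.reverse.foldl
    (fun acc x => acc ++ pvDfs n_gon total [x] ((PySem.List.remove? numbers x).getD numbers)) []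

-- ===== PRECONDITION & SPEC =====
-- Pre_ excludes exactly n_gon = 1, where Python A raises IndexError (ring[1] with
-- len(ring) = 1); the Python B raises there too.
def Pre_find_rings (n_gon : Int) (total : Int) : Prop := n_gon ≠ 1
instance (n_gon : Int) (total : Int) : Decidable (Pre_find_rings n_gon total) := by
  unfold Pre_find_rings; infer_instance

def pvWitness_find_rings : Int × Int := (3, 9)

def Spec_find_rings (n_gon : Int) (total : Int) (out : List String) : Prop :=
  out = find_rings_alt n_gon total
instance (n_gon : Int) (total : Int) (out : List String) :
    Decidable (Spec_find_rings n_gon total out) := by unfold Spec_find_rings; infer_instance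

-- ===== CLAIM (what is proved, stated in full; the proofs are below) =====
def Claim_equal_find_rings : Prop := ∀ (n_gon : Int) (total : Int),
  Dom_find_rings n_gon total → Pre_find_rings n_gon total →
  Spec_find_rings n_gon total (find_rings n_gon total)

-- ===== LEMMAS AND PROOFS =====

lemma pvStep_fst (n_gon total : Int) (ring rest : List Int) (h : ¬ rest.length = 1) :
    (pvStep n_gon total ring rest).1 = [] := by
  unfold pvStep; rw [if_neg h]

-- B's per-candidate body, expressed through pvChild
lemma pvBodyB_eq (n_gon total : Int) (ring rest : List Int) (acc : List String) (x : Int) :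
    (if (ring.length = 1 ∧ x > n_gon + 1) ∨
        (ring.length > 1 ∧ x < PySem.List.pyGetD ring 1 0) then acc
     else
       if _heq : x = total - x - PySem.List.pyGetD ring (-1) 0 then acc
       else if _hmem : total - x - PySem.List.pyGetD ring (-1) 0 ∉ rest then acc
       else acc ++ pvDfs n_gon total
         (ring ++ [x, total - x - PySem.List.pyGetD ring (-1) 0])
         (pvRemove2 rest x (total - x - PySem.List.pyGetD ring (-1) 0))) =
      acc ++ (((pvChild n_gon total ring rest x).toList.map
        (fun st => pvDfs n_gon total st.1 st.2)).flatten) := by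
  unfold pvChild
  split_ifs <;> simp

lemma pvDfs_foldl (n_gon total : Int) (ring rest : List Int) :
    ∀ (l : List {x // x ∈ rest.reverse}) (acc : List String),
    (l.foldl (fun acc x =>
      if (ring.length = 1 ∧ x.1 > n_gon + 1) ∨
          (ring.length > 1 ∧ x.1 < PySem.List.pyGetD ring 1 0) then acc
      else
        let inner := total - x.1 - PySem.List.pyGetD ring (-1) 0
        if heq : x.1 = inner then acc
        else if hmem : inner ∉ rest then acc
        else acc ++ pvDfs n_gon total (ring ++ [x.1, inner]) (pvRemove2 rest x.1 inner))
      acc) =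
      acc ++ ((((l.map Subtype.val).filterMap (pvChild n_gon total ring rest)).map
        (fun st => pvDfs n_gon total st.1 st.2)).flatten) := by
  intro l
  induction l with
  | nil => intro acc; simp
  | cons x xs ih =>
    intro acc
    simp only [List.foldl_cons]
    rw [pvBodyB_eq, ih]
    cases hcx : pvChild n_gon total ring rest x.1 <;> simp [hcx]

-- B's recursion, expressed through A's step function
lemma pvDfs_eq_step (n_gon total : Int) (ring rest : List Int) :
    pvDfs n_gon total ring rest =
      (pvStep n_gon total ring rest).1 ++
      (((pvStep n_gon total ring rest).2.reverse.map
        (fun st => pvDfs n_gon total st.1 st.2)).flatten) := by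
  rw [pvDfs]
  by_cases h : rest.length = 1
  · rw [if_pos h, pvStep_snd_nil n_gon total ring rest h]
    unfold pvStep
    rw [if_pos h]
    dsimp only
    split_ifs <;> simp
  · rw [if_neg h, pvStep_fst n_gon total ring rest h, pvStep_snd n_gon total ring rest h]
    rw [pvDfs_foldl]
    simp [List.attach_map_subtype_val, List.filterMap_reverse]

-- the stack loop processes the top-of-stack subtree first: its result is the
-- concatenation of the recursive results over the reversed stack
lemma pvRun_eq (n_gon total : Int) (stack : List (List Int × List Int))
    (rings : List String) :
    pvRun n_gon total stack rings =
      rings ++ ((stack.reverse.map (fun st => pvDfs n_gon total st.1 st.2)).flatten) := by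
  fun_induction pvRun n_gon total stack rings
  case case1 => simp_all
  case _ stack rings hs st r ih =>
    rw [ih]
    conv_rhs => rw [← List.dropLast_concat_getLast hs]
    simp only [List.reverse_append, List.map_append, List.map_reverse, List.flatten_append,
      List.append_assoc, List.map_cons, List.map_nil, List.reverse_cons, List.reverse_nil,
      List.nil_append, List.flatten_cons, List.flatten_nil, List.append_nil]
    rw [pvDfs_eq_step n_gon total (stack.getLast hs).1 (stack.getLast hs).2]
    simp only [List.map_reverse, List.append_assoc]
    rfl

-- ===== VERDICT (by name: the statement is the Claim_ definition above) =====
theorem find_rings_spec : Claim_equal_find_rings := by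
  intro n_gon total _ _
  unfold Spec_find_rings find_rings find_rings_alt
  simp only
  rw [PySem.List.foldl_append_singleton_eq_map, pvRun_eq]
  rw [PySem.List.foldl_append_eq_flatMap]
  simp [List.map_reverse, List.flatMap_def, Function.comp_def]
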